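-- pv_equiv track=rewrite | github.com/Ascend/msadvisor | tools/prev_check/src/prev_check.py | _get_keys_by_match_value
-- ===== SOURCE A (Python) =====
-- from typing import Dict
--
-- def _get_keys_by_match_value(msg: str, dict_: Dict[str, list]) -> list:
--     results = []
--     max_match_ = ''
--     for key, values in dict_.items():
--         match_ = ''
--         for v in values:
--             if msg.startswith(v) and \
--                 len(match_) < len(v):
--                     match_ = v
--         if match_ == '':
--             continue
--         if len(max_match_) < len(match_):
--             max_match_ = match_
--             results = [key]
--         elif len(max_match_) == len(match_):
--             results.append(key)
--     return results
-- ===== SOURCE B (Python) =====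
-- def _get_keys_by_match_value(msg, dict_):
--     # Search candidate prefixes of msg from longest to shortest: the first prefix
--     # found verbatim in the set of all values is the longest possible match
--     # (every matching value IS a prefix of msg), and the keys holding it are the answer.
--     all_values = set()
--     for values in dict_.values():
--         all_values.update(values)
--     for length in range(len(msg), 0, -1):
--         prefix = msg[:length]
--         if prefix in all_values:
--             return [key for key, values in dict_.items() if prefix in values]
--     return []
-- ===== Notes on version B (the rewrite author's own statement) =====
-- stated objective: alternative
-- what changed: Instead of computing a best prefix-match per key and tracking a running maximum, B collects all values into one set and enumerates candidate prefixes of msg from longest to shortest; the first prefix found in the set is the longest possible match (a matching value of length L is literally msg[:L]), and one comprehension then lists the keys holding it.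
import Mathlib
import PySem

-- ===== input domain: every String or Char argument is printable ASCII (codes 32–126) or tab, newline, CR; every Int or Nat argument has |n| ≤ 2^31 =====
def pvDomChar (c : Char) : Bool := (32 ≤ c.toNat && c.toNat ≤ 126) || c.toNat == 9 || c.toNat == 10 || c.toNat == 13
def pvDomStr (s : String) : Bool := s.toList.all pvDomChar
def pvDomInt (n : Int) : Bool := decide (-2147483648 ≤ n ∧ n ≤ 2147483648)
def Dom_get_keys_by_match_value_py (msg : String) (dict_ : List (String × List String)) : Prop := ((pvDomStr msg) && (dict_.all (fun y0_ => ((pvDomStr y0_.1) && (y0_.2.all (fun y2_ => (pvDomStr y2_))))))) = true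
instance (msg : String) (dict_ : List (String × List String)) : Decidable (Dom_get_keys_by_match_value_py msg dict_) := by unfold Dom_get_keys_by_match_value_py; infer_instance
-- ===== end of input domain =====

-- B replaces A's per-key best-match scan with a running maximum by a search over candidate
-- prefixes of msg, longest first, against the set of all values: the first prefix found gives the
-- answer ("alternative"; every matching value IS a prefix of msg, so a match of length L is msg[:L]).

-- ===== PORT A =====
-- inner loop 'for v in values: if msg.startswith(v) and len(match_) < len(v): match_ = v'
def pvInnerA (msg : String) (values : List String) : String :=
  values.foldl (fun match_ v =>
    if PySem.Str.startswith msg v = true ∧ PySem.Str.len match_ < PySem.Str.len v then v else match_) ""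

def get_keys_by_match_value_py (msg : String) (dict_ : List (String × List String)) : List String :=
  (dict_.foldl (fun st kv =>
      let match_ := pvInnerA msg kv.2
      if match_ = "" then st
      else if PySem.Str.len st.1 < PySem.Str.len match_ then (match_, [kv.1])
      else if PySem.Str.len st.1 = PySem.Str.len match_ then (st.1, st.2 ++ [kv.1])
      else st)
    (("", []) : String × List String)).2

-- ===== PORT B =====
-- 'keys = [key for key, values in dict_.items() if prefix in values]' with prefix = msg[:L]
def pvKeysAt (msg : String) (dict_ : List (String × List String)) (L : Int) : List String :=
  (dict_.filter (fun kv => kv.2.contains (PySem.Str.slice msg none (some L)))).map Prod.fst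

-- 'all_values = set(); for values in dict_.values(): all_values.update(values)'
def pvAllValues (dict_ : List (String × List String)) : PySem.Set String :=
  dict_.foldl (fun s kv => PySem.Set.update s kv.2) PySem.Set.empty

-- 'for length in range(len(msg), 0, -1): prefix = msg[:length]; if prefix in all_values: return […]'
def pvScanB (msg : String) (dict_ : List (String × List String))
    (all_values : PySem.Set String) : List Int → List String
  | [] => []
  | L :: rest =>
      if PySem.Set.contains all_values (PySem.Str.slice msg none (some L)) = true
      then pvKeysAt msg dict_ L
      else pvScanB msg dict_ all_values rest

def get_keys_by_match_value_py_alt (msg : String) (dict_ : List (String × List String)) : List String :=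
  pvScanB msg dict_ (pvAllValues dict_) (PySem.List.pyRange (PySem.Str.len msg) 0 (-1))

-- ===== PRECONDITION & SPEC =====
def Spec_get_keys_by_match_value_py (msg : String) (dict_ : List (String × List String)) (out : List String) : Prop := out = get_keys_by_match_value_py_alt msg dict_
instance (msg : String) (dict_ : List (String × List String)) (out : List String) : Decidable (Spec_get_keys_by_match_value_py msg dict_ out) := by unfold Spec_get_keys_by_match_value_py; infer_instance

-- ===== CLAIM (what is proved, stated in full; the proofs are below) =====
def Claim_equal_get_keys_by_match_value_py : Prop := ∀ (msg : String) (dict_ : List (String × List String)), Dom_get_keys_by_match_value_py msg dict_ → Spec_get_keys_by_match_value_py msg dict_ (get_keys_by_match_value_py msg dict_)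

-- ===== LEMMAS AND PROOFS =====

-- proof-only abbreviations: per-key best prefix-match length, the table of positive ones,
-- the global best, and the keys attaining it (shown equal to BOTH ports)
def pvBestLen (msg : String) (values : List String) : Int :=
  values.foldl (fun acc v =>
    if PySem.Str.startswith msg v = true then max acc (PySem.Str.len v) else acc) 0

def pvTable (msg : String) (l : List (String × List String)) : List (String × Int) :=
  (l.map (fun kv => (kv.1, pvBestLen msg kv.2))).filter (fun p => decide (0 < p.2))

def pvBest (msg : String) (l : List (String × List String)) : Int :=
  (pvTable msg l).foldl (fun acc p => max acc p.2) 0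

def pvBres (msg : String) (l : List (String × List String)) : List String :=
  ((pvTable msg l).filter (fun p => p.2 == pvBest msg l)).map Prod.fst

-- the two folds as plain foldl max over a projected list
theorem pvBestLen_eq (msg : String) (values : List String) :
    pvBestLen msg values
      = ((values.filter (fun v => PySem.Str.startswith msg v)).map PySem.Str.len).foldl max 0 := by
  unfold pvBestLen
  rw [List.foldl_map, List.foldl_filter]

theorem pvBest_eq (msg : String) (l : List (String × List String)) :
    pvBest msg l = ((pvTable msg l).map (fun p => p.2)).foldl max 0 := by
  unfold pvBest
  rw [List.foldl_map]

-- generic helpers for foldl max over Int lists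
theorem pvFoldMaxEqInitOrMem (l : List Int) : ∀ a : Int, l.foldl max a = a ∨ l.foldl max a ∈ l := by
  induction l with
  | nil => intro a; left; rfl
  | cons x xs ih =>
      intro a
      rw [List.foldl_cons]
      rcases ih (max a x) with h | h
      · rcases max_choice a x with h2 | h2
        · left; rw [h, h2]
        · right; rw [h, h2]; exact List.mem_cons_self
      · right; exact List.mem_cons_of_mem _ h

theorem pvFoldMaxLe (l : List Int) (B : Int) :
    ∀ a, a ≤ B → (∀ x ∈ l, x ≤ B) → l.foldl max a ≤ B := by
  induction l with
  | nil => intro a ha _; exact ha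
  | cons x xs ih =>
      intro a ha h
      rw [List.foldl_cons]
      exact ih _ (max_le ha (h x List.mem_cons_self)) (fun y hy => h y (List.mem_cons_of_mem _ hy))

-- per-key facts
theorem pvBestLen_nonneg (msg : String) (values : List String) : 0 ≤ pvBestLen msg values := by
  rw [pvBestLen_eq]
  exact (PySem.List.le_foldl_max _ 0).1

theorem pvBestLen_le_len (msg : String) (values : List String) :
    pvBestLen msg values ≤ (msg.toList.length : Int) := by
  rw [pvBestLen_eq]
  refine pvFoldMaxLe _ _ 0 (by positivity) ?_
  intro x hx
  rcases List.mem_map.mp hx with ⟨v, hv, rfl⟩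
  have hp : v.toList <+: msg.toList :=
    (PySem.Chars.startswith_iff _ _).mp
      (by rw [← PySem.Str.startswith_eq]; exact (List.mem_filter.mp hv).2)
  simp only [PySem.Str.len_eq]
  exact_mod_cast hp.length_le

theorem pvBestLen_ge_of_mem (msg : String) (values : List String) (v : String)
    (hv : v ∈ values) (hs : PySem.Str.startswith msg v = true) :
    PySem.Str.len v ≤ pvBestLen msg values := by
  rw [pvBestLen_eq]
  exact (PySem.List.le_foldl_max _ 0).2 _
    (List.mem_map_of_mem (List.mem_filter.mpr ⟨hv, hs⟩))

theorem pvBestLen_attained (msg : String) (values : List String)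
    (h : pvBestLen msg values ≠ 0) :
    ∃ v ∈ values, PySem.Str.startswith msg v = true ∧ PySem.Str.len v = pvBestLen msg values := by
  rw [pvBestLen_eq] at h ⊢
  rcases pvFoldMaxEqInitOrMem _ 0 with h0 | hm
  · exact absurd h0 h
  · rcases List.mem_map.mp hm with ⟨v, hv, hlen⟩
    exact ⟨v, (List.mem_filter.mp hv).1, (List.mem_filter.mp hv).2, hlen⟩

-- global facts
theorem pvMem_le_best (msg : String) (l : List (String × List String)) :
    ∀ p ∈ pvTable msg l, p.2 ≤ pvBest msg l := by
  intro p hp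
  rw [pvBest_eq]
  exact (PySem.List.le_foldl_max _ 0).2 _ (List.mem_map_of_mem hp)

theorem pvBest_nonneg (msg : String) (l : List (String × List String)) : 0 ≤ pvBest msg l := by
  rw [pvBest_eq]
  exact (PySem.List.le_foldl_max _ 0).1

theorem pvBestLen_le_pvBest (msg : String) (l : List (String × List String))
    (kv : String × List String) (hkv : kv ∈ l) :
    pvBestLen msg kv.2 ≤ pvBest msg l := by
  by_cases h : 0 < pvBestLen msg kv.2
  · refine pvMem_le_best msg l (kv.1, pvBestLen msg kv.2) ?_
    exact List.mem_filter.mpr ⟨List.mem_map_of_mem hkv, by simpa using h⟩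
  · exact le_trans (le_of_not_gt h) (pvBest_nonneg msg l)

theorem pvBest_le_len (msg : String) (l : List (String × List String)) :
    pvBest msg l ≤ (msg.toList.length : Int) := by
  rw [pvBest_eq]
  refine pvFoldMaxLe _ _ 0 (by positivity) ?_
  intro x hx
  rcases List.mem_map.mp hx with ⟨p, hp, rfl⟩
  rcases List.mem_map.mp (List.mem_filter.mp hp).1 with ⟨kv, _, rfl⟩
  exact pvBestLen_le_len msg kv.2

theorem pvBest_attained (msg : String) (l : List (String × List String))
    (h : pvBest msg l ≠ 0) : ∃ p ∈ pvTable msg l, p.2 = pvBest msg l := by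
  rcases pvFoldMaxEqInitOrMem ((pvTable msg l).map (fun p => p.2)) 0 with h0 | hm
  · exact absurd (by rw [pvBest_eq]; exact h0) h
  · rw [← pvBest_eq] at hm
    rcases List.mem_map.mp hm with ⟨p, hp, hlen⟩
    exact ⟨p, hp, hlen⟩

-- the slice msg[:L] is the prefix of msg of length L (for 0 < L ≤ len(msg))
theorem pvSlice_toList (msg : String) (L : Int) (h0 : 0 ≤ L) :
    (PySem.Str.slice msg none (some L)).toList = msg.toList.take L.toNat := by
  rw [PySem.Str.toList_slice, PySem.Chars.slice_eq_listSlice, PySem.List.slice_to _ h0]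

theorem pvSlice_len (msg : String) (L : Int) (h0 : 0 ≤ L) (hL : L ≤ (msg.toList.length : Int)) :
    PySem.Str.len (PySem.Str.slice msg none (some L)) = L := by
  simp only [PySem.Str.len_eq, pvSlice_toList msg L h0, List.length_take]
  omega

-- membership of msg[:L] in a value list pins the per-key best length at L
theorem pvContains_imp_le (msg : String) (values : List String) (L : Int)
    (h0 : 0 ≤ L) (hL : L ≤ (msg.toList.length : Int))
    (h : values.contains (PySem.Str.slice msg none (some L)) = true) :
    L ≤ pvBestLen msg values := by
  have hmem : PySem.Str.slice msg none (some L) ∈ values := List.contains_iff_mem.mp h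
  have hs : PySem.Str.startswith msg (PySem.Str.slice msg none (some L)) = true := by
    rw [PySem.Str.startswith_eq]
    refine (PySem.Chars.startswith_iff _ _).mpr ?_
    rw [pvSlice_toList msg L h0]
    exact List.take_prefix _ _
  have := pvBestLen_ge_of_mem msg values _ hmem hs
  rwa [pvSlice_len msg L h0 hL] at this
theorem pvBestLen_imp_contains (msg : String) (values : List String) (L : Int)
    (h0 : 0 < L) (hb : pvBestLen msg values = L) :
    values.contains (PySem.Str.slice msg none (some L)) = true := by
  rcases pvBestLen_attained msg values (by omega) with ⟨v, hv, hs, hlen⟩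
  rw [hb] at hlen
  have hp : v.toList <+: msg.toList :=
    (PySem.Chars.startswith_iff _ _).mp (by rw [← PySem.Str.startswith_eq]; exact hs)
  have hveq : v = PySem.Str.slice msg none (some L) := by
    apply String.toList_inj.mp
    rw [pvSlice_toList msg L (le_of_lt h0)]
    have := List.prefix_iff_eq_take.mp hp
    rw [this]
    congr 1
    have : (v.toList.length : Int) = L := by simpa [PySem.Str.len_eq] using hlen
    omega
  exact List.contains_iff_mem.mpr (hveq ▸ hv)

-- membership in the collected value set = some key's value list holds v
theorem pvAll_contains_iff (dict_ : List (String × List String)) (v : String) :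
    PySem.Set.contains (pvAllValues dict_) v = true ↔ ∃ kv ∈ dict_, v ∈ kv.2 := by
  unfold pvAllValues
  suffices h : ∀ (l : List (String × List String)) (s : PySem.Set String),
      PySem.Set.contains (l.foldl (fun s kv => PySem.Set.update s kv.2) s) v = true ↔
        v ∈ s ∨ ∃ kv ∈ l, v ∈ kv.2 by
    rw [h]
    simp [PySem.Set.empty]
  intro l
  induction l with
  | nil => intro s; simp
  | cons kv l ih =>
      intro s
      rw [List.foldl_cons, ih, PySem.Set.mem_update]
      simp only [List.exists_mem_cons_iff]
      tauto

-- the set check at a length above the global best fails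
theorem pvAll_not_contains (msg : String) (dict_ : List (String × List String)) (L : Int)
    (h0 : 0 < L) (hL : L ≤ (msg.toList.length : Int)) (hgt : pvBest msg dict_ < L) :
    ¬ PySem.Set.contains (pvAllValues dict_) (PySem.Str.slice msg none (some L)) = true := by
  intro hc
  rcases (pvAll_contains_iff dict_ _).mp hc with ⟨kv, hkv, hv⟩
  have h1 := pvContains_imp_le msg kv.2 L (le_of_lt h0) hL (List.contains_iff_mem.mpr hv)
  have h2 := pvBestLen_le_pvBest msg dict_ kv hkv
  omega

-- the set check at exactly the global best length (when positive) succeeds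
theorem pvAll_contains_best (msg : String) (dict_ : List (String × List String))
    (h : pvBest msg dict_ ≠ 0) :
    PySem.Set.contains (pvAllValues dict_)
      (PySem.Str.slice msg none (some (pvBest msg dict_))) = true := by
  have hpos : 0 < pvBest msg dict_ := lt_of_le_of_ne (pvBest_nonneg msg dict_) (Ne.symm h)
  rcases pvBest_attained msg dict_ h with ⟨p, hp, hpeq⟩
  rcases List.mem_map.mp (List.mem_filter.mp hp).1 with ⟨kv, hkv, rfl⟩
  have hc := pvBestLen_imp_contains msg kv.2 (pvBest msg dict_) hpos hpeq
  exact (pvAll_contains_iff dict_ _).mpr ⟨kv, hkv, List.contains_iff_mem.mp hc⟩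

-- B's pass at exactly the global best length returns A's result list
theorem pvKeysAt_best (msg : String) (dict_ : List (String × List String))
    (h : pvBest msg dict_ ≠ 0) :
    pvKeysAt msg dict_ (pvBest msg dict_) = pvBres msg dict_ := by
  have hpos : 0 < pvBest msg dict_ := lt_of_le_of_ne (pvBest_nonneg msg dict_) (Ne.symm h)
  have hlen := pvBest_le_len msg dict_
  unfold pvBres pvTable pvKeysAt
  rw [List.filter_filter, List.filter_map, List.map_map]
  have hf : (Prod.fst ∘ fun kv : String × List String => (kv.1, pvBestLen msg kv.2)) = Prod.fst := rfl
  rw [hf]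
  refine (congrArg (List.map Prod.fst) (List.filter_congr ?_)).symm
  intro kv hkv
  rw [Bool.eq_iff_iff]
  simp only [Function.comp_apply, Bool.and_eq_true, decide_eq_true_eq, beq_iff_eq]
  constructor
  · rintro ⟨hb, _⟩
    exact pvBestLen_imp_contains msg kv.2 _ hpos hb
  · intro hc
    have h1 := pvContains_imp_le msg kv.2 _ (le_of_lt hpos) hlen hc
    have h2 := pvBestLen_le_pvBest msg dict_ kv hkv
    exact ⟨by omega, by omega⟩

-- A's result list is empty when the global best is 0
theorem pvBres_of_zero (msg : String) (dict_ : List (String × List String))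
    (h : pvBest msg dict_ = 0) : pvBres msg dict_ = [] := by
  unfold pvBres
  have : (pvTable msg dict_).filter (fun p => p.2 == pvBest msg dict_) = [] := by
    rw [List.filter_eq_nil_iff]
    intro p hp
    have hppos : 0 < p.2 := by simpa using (List.mem_filter.mp hp).2
    simp only [beq_iff_eq]
    omega
  rw [this, List.map_nil]

-- the countdown scan from any n between pvBest and len(msg) lands on pvBres
theorem pvScan_to_best (msg : String) (dict_ : List (String × List String)) :
    ∀ n : Nat, pvBest msg dict_ ≤ (n : Int) → (n : Int) ≤ (msg.toList.length : Int) →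
      pvScanB msg dict_ (pvAllValues dict_) (PySem.List.pyRange (n : Int) 0 (-1))
        = pvBres msg dict_ := by
  intro n
  induction n with
  | zero =>
      intro h1 _
      have h0 : pvBest msg dict_ = 0 := le_antisymm (by exact_mod_cast h1) (pvBest_nonneg msg dict_)
      rw [PySem.List.pyRange_neg_one_eq_nil (by norm_num)]
      simp [pvScanB, pvBres_of_zero msg dict_ h0]
  | succ n ih =>
      intro h1 h2
      rw [PySem.List.pyRange_neg_one_cons (by exact_mod_cast Nat.succ_pos n)]
      by_cases hEq : pvBest msg dict_ = ((n + 1 : Nat) : Int)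
      · have hne : pvBest msg dict_ ≠ 0 := by omega
        simp only [pvScanB]
        rw [← hEq, if_pos (pvAll_contains_best msg dict_ hne), pvKeysAt_best msg dict_ hne]
      · have hlt : pvBest msg dict_ < ((n + 1 : Nat) : Int) := lt_of_le_of_ne h1 hEq
        simp only [pvScanB]
        rw [if_neg (pvAll_not_contains msg dict_ _ (by exact_mod_cast Nat.succ_pos n) h2 hlt)]
        have hcast : ((n + 1 : Nat) : Int) - 1 = (n : Int) := by push_cast; ring
        rw [hcast]
        exact ih (by omega) (by push_cast at h2 ⊢; omega)

-- A-side loop characterisation (A's fold over dict_ ends in (a best string, pvBres))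
theorem pvInner_len (msg : String) (values : List String) :
    PySem.Str.len (pvInnerA msg values) = pvBestLen msg values := by
  unfold pvInnerA pvBestLen
  suffices h : ∀ (m : String),
      PySem.Str.len (values.foldl (fun match_ v =>
        if PySem.Str.startswith msg v = true ∧ PySem.Str.len match_ < PySem.Str.len v then v else match_) m)
      = values.foldl (fun acc v =>
        if PySem.Str.startswith msg v = true then max acc (PySem.Str.len v) else acc) (PySem.Str.len m) by
    have := h ""
    simpa [PySem.Str.len_eq] using this
  induction values with
  | nil => intro m; simp
  | cons v vs ih =>
      intro m
      simp only [List.foldl_cons]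
      rw [ih]
      congr 1
      by_cases hs : PySem.Str.startswith msg v = true
      · by_cases hl : PySem.Str.len m < PySem.Str.len v
        · rw [if_pos ⟨hs, hl⟩, if_pos hs]
          exact (max_eq_right (le_of_lt hl)).symm
        · rw [if_neg (fun h => hl h.2), if_pos hs]
          exact (max_eq_left (le_of_not_gt hl)).symm
      · rw [if_neg (fun h => hs h.1), if_neg hs]

theorem pvInner_empty_iff (msg : String) (values : List String) :
    pvInnerA msg values = "" ↔ pvBestLen msg values = 0 := by
  constructor
  · intro h
    rw [← pvInner_len, h]
    simp [PySem.Str.len_eq]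
  · intro h
    have h1 : PySem.Str.len (pvInnerA msg values) = 0 := by rw [pvInner_len]; exact h
    have h2 : (pvInnerA msg values).length = 0 := by simpa [PySem.Str.len_eq] using h1
    exact String.length_eq_zero_iff.mp h2

theorem pvTable_append (msg : String) (l : List (String × List String)) (x : String × List String) :
    pvTable msg (l ++ [x]) = pvTable msg l ++
      (if 0 < pvBestLen msg x.2 then [(x.1, pvBestLen msg x.2)] else []) := by
  unfold pvTable
  simp only [List.map_append, List.filter_append, List.map_cons, List.map_nil, List.filter_cons,
    List.filter_nil]
  split <;> simp_all

theorem pvBest_append (msg : String) (l : List (String × List String)) (x : String × List String) :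
    pvBest msg (l ++ [x]) = if 0 < pvBestLen msg x.2
      then max (pvBest msg l) (pvBestLen msg x.2) else pvBest msg l := by
  unfold pvBest
  rw [pvTable_append]
  split <;> simp [List.foldl_append]

theorem pvLoop_inv (msg : String) (l : List (String × List String)) :
    PySem.Str.len (l.foldl (fun st kv =>
        let match_ := pvInnerA msg kv.2
        if match_ = "" then st
        else if PySem.Str.len st.1 < PySem.Str.len match_ then (match_, [kv.1])
        else if PySem.Str.len st.1 = PySem.Str.len match_ then (st.1, st.2 ++ [kv.1])
        else st) (("", []) : String × List String)).1 = pvBest msg l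
    ∧ (l.foldl (fun st kv =>
        let match_ := pvInnerA msg kv.2
        if match_ = "" then st
        else if PySem.Str.len st.1 < PySem.Str.len match_ then (match_, [kv.1])
        else if PySem.Str.len st.1 = PySem.Str.len match_ then (st.1, st.2 ++ [kv.1])
        else st) (("", []) : String × List String)).2 = pvBres msg l := by
  induction l using List.reverseRecOn with
  | nil => constructor <;> simp [pvBest, pvBres, pvTable, PySem.Str.len_eq]
  | append_singleton l x ih =>
      obtain ⟨ih1, ih2⟩ := ih
      rw [PySem.Str.len_eq, String.length_toList] at ih1
      rw [List.foldl_append, List.foldl_cons, List.foldl_nil]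
      set st := (l.foldl (fun st kv =>
        let match_ := pvInnerA msg kv.2
        if match_ = "" then st
        else if PySem.Str.len st.1 < PySem.Str.len match_ then (match_, [kv.1])
        else if PySem.Str.len st.1 = PySem.Str.len match_ then (st.1, st.2 ++ [kv.1])
        else st) (("", []) : String × List String)) with hst
      by_cases hz : pvInnerA msg x.2 = ""
      · -- the new key matches nothing: everything is unchanged
        have hL : pvBestLen msg x.2 = 0 := (pvInner_empty_iff msg x.2).mp hz
        have ht : pvTable msg (l ++ [x]) = pvTable msg l := by rw [pvTable_append]; simp [hL]
        have hb : pvBest msg (l ++ [x]) = pvBest msg l := by unfold pvBest; rw [ht]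
        have hr : pvBres msg (l ++ [x]) = pvBres msg l := by unfold pvBres; rw [ht, hb]
        refine ⟨?_, ?_⟩
        · simp [hz, hb, ih1]
        · simp [hz, hr, ih2]
      · have hLpos : 0 < pvBestLen msg x.2 := by
          rcases lt_or_eq_of_le (pvBestLen_nonneg msg x.2) with h | h
          · exact h
          · exact absurd ((pvInner_empty_iff msg x.2).mpr h.symm) hz
        have hlen : ((pvInnerA msg x.2).length : Int) = pvBestLen msg x.2 := by
          have h := pvInner_len msg x.2
          rw [PySem.Str.len_eq, String.length_toList] at h
          exact h
        have ht : pvTable msg (l ++ [x]) = pvTable msg l ++ [(x.1, pvBestLen msg x.2)] := by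
          rw [pvTable_append]; simp [hLpos]
        have hb : pvBest msg (l ++ [x]) = max (pvBest msg l) (pvBestLen msg x.2) := by
          rw [pvBest_append]; simp [hLpos]
        by_cases hlt : pvBest msg l < pvBestLen msg x.2
        · -- strictly better: new singleton result
          have hb' : pvBest msg (l ++ [x]) = pvBestLen msg x.2 := by rw [hb]; omega
          have hres : pvBres msg (l ++ [x]) = [x.1] := by
            unfold pvBres
            rw [ht, hb', List.filter_append, List.map_append]
            have hold : (pvTable msg l).filter (fun p => p.2 == pvBestLen msg x.2) = [] := by
              rw [List.filter_eq_nil_iff]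
              intro p hp
              have := pvMem_le_best msg l p hp
              simp only [beq_iff_eq]
              omega
            simp [hold]
          refine ⟨?_, ?_⟩ <;> simp [hz, ih1, hlen, hlt, hb', hres]
        · by_cases heq : pvBest msg l = pvBestLen msg x.2
          · -- ties the running best: key appended
            have hb' : pvBest msg (l ++ [x]) = pvBest msg l := by rw [hb]; omega
            have hres : pvBres msg (l ++ [x]) = pvBres msg l ++ [x.1] := by
              unfold pvBres
              rw [ht, hb', List.filter_append]
              have htail : [(x.1, pvBestLen msg x.2)].filter (fun p => p.2 == pvBest msg l) =
                  [(x.1, pvBestLen msg x.2)] := by simp [heq]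
              rw [htail, List.map_append]
              rfl
            refine ⟨?_, ?_⟩ <;> simp [hz, ih1, hlen, heq, hb', hres, ih2]
          · -- strictly worse: state unchanged
            have hb' : pvBest msg (l ++ [x]) = pvBest msg l := by rw [hb]; omega
            have hres : pvBres msg (l ++ [x]) = pvBres msg l := by
              unfold pvBres
              rw [ht, hb', List.filter_append]
              have htail : [(x.1, pvBestLen msg x.2)].filter (fun p => p.2 == pvBest msg l) =
                  [] := by
                simp only [List.filter_cons, List.filter_nil, beq_iff_eq]
                rw [if_neg (fun h => heq h.symm)]
              rw [htail, List.append_nil]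
            refine ⟨?_, ?_⟩ <;> simp [hz, ih1, hlen, hlt, heq, hb', hres, ih2]

-- ===== VERDICT (by name: the statement is the Claim_ definition above) =====
theorem get_keys_by_match_value_py_spec : Claim_equal_get_keys_by_match_value_py := by
  intro msg dict_ _
  unfold Spec_get_keys_by_match_value_py get_keys_by_match_value_py
  rw [(pvLoop_inv msg dict_).2]
  unfold get_keys_by_match_value_py_alt
  rw [PySem.Str.len_eq]
  exact (pvScan_to_best msg dict_ msg.toList.length (pvBest_le_len msg dict_) le_rfl).symm
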